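-- pv_equiv track=rewrite | github.com/kurniawan86/GAmean_Kmean_BuRani | kmeans_ori.py | __getIndexMin
-- ===== SOURCE A (Python) =====
-- def __getIndexMin(data):
--     n = len(data)
--     index = 0
--     minimal = data[0]
--     for i in range(1, n):
--         if minimal > data[i]:
--             index = i
--             minimal = data[i]
--     return index
-- ===== SOURCE B (Python) =====
-- def __getIndexMin(data):
--     return data.index(min(data))
-- ===== Notes on version B (the rewrite author's own statement) =====
-- stated objective: idiomatic
-- what changed: Replaces the explicit argmin loop with data.index(min(data)): one builtin min pass and one builtin index scan instead of a hand-written running-minimum loop.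
import Mathlib
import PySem

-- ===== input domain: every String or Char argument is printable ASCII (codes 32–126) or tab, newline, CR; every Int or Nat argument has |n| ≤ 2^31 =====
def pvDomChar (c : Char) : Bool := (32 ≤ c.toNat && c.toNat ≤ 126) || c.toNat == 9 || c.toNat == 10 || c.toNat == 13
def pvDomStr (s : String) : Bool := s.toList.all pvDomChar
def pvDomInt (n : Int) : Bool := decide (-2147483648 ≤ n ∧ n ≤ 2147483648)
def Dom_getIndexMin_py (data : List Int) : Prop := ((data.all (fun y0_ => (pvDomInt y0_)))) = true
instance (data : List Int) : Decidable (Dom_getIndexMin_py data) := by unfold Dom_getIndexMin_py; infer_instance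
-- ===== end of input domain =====

-- B replaces the explicit running-minimum loop with data.index(min(data)); objective: idiomatic.

-- ===== PORT A =====
def getIndexMin_py (data : List Int) : Int :=
  let n : Int := PySem.List.len data
  let index : Int := 0
  let minimal : Int := PySem.List.pyGetD data 0 0   -- data[0]; the empty list (IndexError) is excluded by Pre_
  let st := (PySem.List.pyRange 1 n 1).foldl
    (fun (st : Int × Int) i =>
      if st.2 > PySem.List.pyGetD data i 0 then (i, PySem.List.pyGetD data i 0) else st)
    (index, minimal)
  st.1

-- ===== PORT B =====
def getIndexMin_py_alt (data : List Int) : Int :=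
  match PySem.List.min? data (fun x => x) with
  | none => 0   -- min([]) raises ValueError in Python; excluded by Pre_
  | some m => (((PySem.List.index? data m).getD 0 : Nat) : Int)

-- ===== PRECONDITION & SPEC =====
-- Pre_ excludes exactly the empty list, on which A raises IndexError (and B raises ValueError).
def Pre_getIndexMin_py (data : List Int) : Prop := data ≠ []
instance (data : List Int) : Decidable (Pre_getIndexMin_py data) := by unfold Pre_getIndexMin_py; infer_instance
def pvWitness_getIndexMin_py : List Int := [3, 1, 2]
def Spec_getIndexMin_py (data : List Int) (out : Int) : Prop := out = getIndexMin_py_alt data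
instance (data : List Int) (out : Int) : Decidable (Spec_getIndexMin_py data out) := by unfold Spec_getIndexMin_py; infer_instance

-- ===== CLAIM (what is proved, stated in full; the proofs are below) =====
def Claim_equal_getIndexMin_py : Prop := ∀ (data : List Int), Dom_getIndexMin_py data → Pre_getIndexMin_py data → Spec_getIndexMin_py data (getIndexMin_py data)

-- ===== LEMMAS AND PROOFS =====

-- A's loop, written structurally over the remaining elements: state (index, minimal), pos = current absolute index.
def argminLoop : List Int → Int × Int → Int → Int × Int
  | [], acc, _ => acc
  | y :: ys, acc, pos => argminLoop ys (if acc.2 > y then (pos, y) else acc) (pos + 1)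

lemma foldl_min_le (ys : List Int) : ∀ m : Int, ys.foldl min m ≤ m := by
  induction ys with
  | nil => intro m; simp
  | cons y t ih => intro m; simpa using le_trans (ih (min m y)) (min_le_left _ _)

lemma foldl_min_mem (ys : List Int) : ∀ m : Int, ys.foldl min m = m ∨ ys.foldl min m ∈ ys := by
  induction ys with
  | nil => intro m; simp
  | cons y t ih =>
    intro m
    rcases ih (min m y) with h | h
    · rcases min_cases m y with ⟨he, _⟩ | ⟨he, _⟩
      · left; simp only [List.foldl_cons]; rw [h, he]
      · right; simp only [List.foldl_cons]; rw [h, he]; exact List.mem_cons_self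
    · right; exact List.mem_cons_of_mem _ h

lemma idxOf?_of_mem {v : Int} : ∀ {xs : List Int}, v ∈ xs → List.idxOf? v xs = some (xs.idxOf v)
  | [], h => by simp at h
  | x :: t, h => by
    rw [List.idxOf?_cons]
    by_cases hx : x = v
    · subst hx; simp [List.idxOf_cons_self]
    · have hv : v ∈ t := by
        rcases List.mem_cons.mp h with h' | h'
        · exact absurd h'.symm hx
        · exact h'
      rw [if_neg (by simpa using hx), idxOf?_of_mem hv, List.idxOf_cons_ne _ hx]
      simp [Nat.succ_eq_add_one]

lemma foldA_eq_argminLoop (t : List Int) : ∀ (pre : List Int) (acc : Int × Int),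
    (PySem.List.pyRange (pre.length : Int) ((pre.length : Int) + t.length) 1).foldl
      (fun (st : Int × Int) i =>
        if st.2 > PySem.List.pyGetD (pre ++ t) i 0 then (i, PySem.List.pyGetD (pre ++ t) i 0) else st)
      acc
    = argminLoop t acc (pre.length : Int) := by
  induction t with
  | nil =>
    intro pre acc
    rw [PySem.List.pyRange_one_eq_nil (by simp)]
    simp [argminLoop]
  | cons y ys ih =>
    intro pre acc
    rw [PySem.List.pyRange_one_cons (by simp)]
    have hget : PySem.List.pyGetD (pre ++ y :: ys) (pre.length : Int) 0 = y := by
      rw [PySem.List.pyGetD_eq_getElem (pre ++ y :: ys) 0 (by omega) (by simp)]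
      simp
    simp only [List.foldl_cons, hget]
    have h2 := ih (pre ++ [y]) (if acc.2 > y then ((pre.length : Int), y) else acc)
    simp only [List.append_assoc, List.singleton_append, List.length_append,
      List.length_singleton] at h2
    push_cast at h2
    rw [show (((pre.length : Int)) + (((y :: ys).length : Nat) : Int)) = ((pre.length : Int) + 1) + ((ys.length : Nat) : Int) by
          simp [List.length_cons]; ring]
    rw [h2]
    simp [argminLoop]

lemma argminLoop_spec (t : List Int) : ∀ (idx m pos : Int),
    argminLoop t (idx, m) pos
      = (if t.foldl min m < m then pos + (t.idxOf (t.foldl min m) : Int) else idx, t.foldl min m) := by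
  induction t with
  | nil => intro idx m pos; simp [argminLoop]
  | cons y ys ih =>
    intro idx m pos
    simp only [argminLoop, List.foldl_cons]
    by_cases h : m > y
    · simp only [if_pos h, ih]
      have hmin : min m y = y := by omega
      rw [hmin]
      have hle : ys.foldl min y ≤ y := foldl_min_le ys y
      by_cases h2 : ys.foldl min y < y
      · rw [if_pos h2, if_pos (by omega), List.idxOf_cons_ne _ (by omega)]
        push_cast [Nat.succ_eq_add_one]
        simp only [Prod.mk.injEq]
        exact ⟨by ring, trivial⟩
      · have heq : ys.foldl min y = y := le_antisymm hle (by omega)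
        rw [if_neg h2, heq, if_pos h, List.idxOf_cons_self]
        simp
    · simp only [if_neg h, ih]
      have hmin : min m y = m := by omega
      rw [hmin]
      by_cases h2 : ys.foldl min m < m
      · rw [if_pos h2, if_pos h2, List.idxOf_cons_ne _ (by omega)]
        push_cast [Nat.succ_eq_add_one]
        simp only [Prod.mk.injEq]
        exact ⟨by ring, trivial⟩
      · rw [if_neg h2, if_neg h2]

-- ===== VERDICT (by name: the statement is the Claim_ definition above) =====
theorem getIndexMin_py_spec : Claim_equal_getIndexMin_py := by
  intro data _ hpre
  unfold Spec_getIndexMin_py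
  obtain ⟨x, xs, rfl⟩ := List.exists_cons_of_ne_nil hpre
  have hM : xs.foldl min x ≤ x := foldl_min_le xs x
  have hA : getIndexMin_py (x :: xs)
      = (if xs.foldl min x < x then 1 + (xs.idxOf (xs.foldl min x) : Int) else 0) := by
    unfold getIndexMin_py
    simp only [PySem.List.pyGetD_zero_cons]
    have h1 := foldA_eq_argminLoop xs [x] ((0 : Int), x)
    simp only [List.length_singleton, Nat.cast_one, List.singleton_append] at h1
    rw [show (PySem.List.len (x :: xs)) = (1 : Int) + (xs.length : Int) by
          simp [PySem.List.len]; ring]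
    rw [h1, argminLoop_spec]
  rw [hA]
  unfold getIndexMin_py_alt
  rw [show PySem.List.min? (x :: xs) (fun x => x) = some (xs.foldl min x) from
        PySem.List.min?_id_cons x xs]
  simp only [PySem.List.index?_eq_idxOf?]
  by_cases h : xs.foldl min x < x
  · have hmem : xs.foldl min x ∈ xs := by
      rcases foldl_min_mem xs x with he | hm
      · omega
      · exact hm
    rw [if_pos h, idxOf?_of_mem (List.mem_cons_of_mem _ hmem),
        List.idxOf_cons_ne _ (by omega)]
    simp only [Option.getD_some, Nat.succ_eq_add_one]
    push_cast [Nat.succ_eq_add_one]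
    ring
  · have heq : xs.foldl min x = x := le_antisymm hM (by omega)
    rw [if_neg h, heq, idxOf?_of_mem List.mem_cons_self]
    simp [List.idxOf_cons_self]
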